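-- pv_equiv track=rewrite | github.com/AndrewS-hash/pyFiddle | pyFiddle_Intermediate.py | re_arrange_array
-- ===== SOURCE A (Python) =====
-- def re_arrange_array(arr, n):
--     """
--     Re-arranges the first n elements of the array so that all negative elements
--     appear before positive ones, preserving their relative order.
--
--     Parameters:
--     arr (list): The input array of integers.
--     n (int): The number of elements to consider for re-arrangement.
--
--     Returns:
--     list: The modified array with the first n elements re-arranged.
--     """
--     temp_negatives = []
--     positives = []
--
--     # Separate the first n elements into negatives and positives
--     for i in range(n):
--         if arr[i] < 0:
--             temp_negatives.append(arr[i])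
--         else:
--             positives.append(arr[i])
--
--     # Concatenate the negative elements followed by the positive elements
--     arr[:n] = temp_negatives + positives
--
--     return arr
-- ===== SOURCE B (Python) =====
-- def re_arrange_array(arr, n):
--     """Stable-sort re-implementation: negatives (key False) before non-negatives
--     (key True), relative order preserved by sort stability. Mutates arr like A."""
--     first = [arr[i] for i in range(n)]
--     arr[:n] = sorted(first, key=lambda x: x >= 0)
--     return arr
-- ===== Notes on version B (the rewrite author's own statement) =====
-- stated objective: idiomatic
-- what changed: Replaces the manual two-accumulator partition of the first n elements by one stable key-sort (key = x >= 0), whose stability keeps negatives before non-negatives in original order.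
import Mathlib
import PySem

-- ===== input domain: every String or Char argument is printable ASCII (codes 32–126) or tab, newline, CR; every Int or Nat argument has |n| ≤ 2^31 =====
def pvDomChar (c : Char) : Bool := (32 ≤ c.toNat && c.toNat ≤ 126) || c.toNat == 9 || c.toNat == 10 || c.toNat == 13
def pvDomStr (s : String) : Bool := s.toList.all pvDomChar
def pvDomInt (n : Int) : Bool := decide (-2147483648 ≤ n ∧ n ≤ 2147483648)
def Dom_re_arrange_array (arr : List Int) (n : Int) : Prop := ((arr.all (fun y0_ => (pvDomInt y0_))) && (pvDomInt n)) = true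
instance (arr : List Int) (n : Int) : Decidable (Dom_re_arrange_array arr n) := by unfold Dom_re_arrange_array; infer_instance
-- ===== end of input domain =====

-- B replaces A's manual two-list partition of the first n elements by a single stable
-- key-sort (key = x >= 0); same result, proved equal wherever A returns (both mutate
-- arr in place in Python the same way; the theorem is about the return value).


-- ===== PORT A =====
-- for i in range(n): append arr[i] to the negatives or the positives accumulator;
-- then arr[:n] = temp_negatives + positives, i.e. result = (negs ++ poss) ++ arr[n:].
def re_arrange_array (arr : List Int) (n : Int) : List Int :=
  let p := (PySem.List.pyRange 0 n 1).foldl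
    (fun (acc : List Int × List Int) i =>
      if PySem.List.pyGetD arr i 0 < 0 then (acc.1 ++ [PySem.List.pyGetD arr i 0], acc.2)
      else (acc.1, acc.2 ++ [PySem.List.pyGetD arr i 0]))
    ([], [])
  (p.1 ++ p.2) ++ PySem.List.slice arr (some n) none

-- ===== PORT B =====
-- first = [arr[i] for i in range(n)]; arr[:n] = sorted(first, key=lambda x: x >= 0)
def re_arrange_array_alt (arr : List Int) (n : Int) : List Int :=
  let first := (PySem.List.pyRange 0 n 1).map (fun i => PySem.List.pyGetD arr i 0)
  PySem.List.sorted first (fun x => decide (0 ≤ x)) false ++ PySem.List.slice arr (some n) none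

-- ===== PRECONDITION & SPEC =====
-- A raises IndexError at arr[i] exactly when n > len(arr); excluded (B raises there too).
def Pre_re_arrange_array (arr : List Int) (n : Int) : Prop := n ≤ (arr.length : Int)
instance (arr : List Int) (n : Int) : Decidable (Pre_re_arrange_array arr n) := by unfold Pre_re_arrange_array; infer_instance
def pvWitness_re_arrange_array : List Int × Int := ([3, -1, 2, -4], 3)

def Spec_re_arrange_array (arr : List Int) (n : Int) (out : List Int) : Prop := out = re_arrange_array_alt arr n
instance (arr : List Int) (n : Int) (out : List Int) : Decidable (Spec_re_arrange_array arr n out) := by unfold Spec_re_arrange_array; infer_instance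

-- ===== CLAIM (what is proved, stated in full; the proofs are below) =====
def Claim_equal_re_arrange_array : Prop := ∀ (arr : List Int) (n : Int), Dom_re_arrange_array arr n → Pre_re_arrange_array arr n → Spec_re_arrange_array arr n (re_arrange_array arr n)

-- ===== LEMMAS AND PROOFS =====

-- A's partition loop, generalized over the accumulators.
theorem pvA_fold (l a b : List Int) :
    l.foldl (fun (acc : List Int × List Int) x =>
        if x < 0 then (acc.1 ++ [x], acc.2) else (acc.1, acc.2 ++ [x])) (a, b)
      = (a ++ l.filter (fun x => decide (x < 0)), b ++ l.filter (fun x => decide (0 ≤ x))) := by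
  induction l generalizing a b with
  | nil => simp
  | cons x t ih =>
    by_cases hx : x < 0
    · simp [hx, ih, show ¬ (0 ≤ x) by omega]
    · simp [hx, ih, show 0 ≤ x by omega]

-- one-step unfolding of insertBy on a cons (definitional)
theorem pvInsertBy_cons {α : Type} (before : α → α → Bool) (x y : α) (ys : List α) :
    PySem.List.insertBy before x (y :: ys)
      = if before x y then x :: y :: ys else y :: PySem.List.insertBy before x ys := rfl

-- inserting a negative element passes all negatives and lands before the non-negatives
theorem pvIns_neg (x : Int) (hx : x < 0) (negs poss : List Int)
    (hn : ∀ y ∈ negs, y < 0) (hp : ∀ y ∈ poss, 0 ≤ y) :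
    PySem.List.insertBy
      (fun a b => decide ((fun z => decide ((0:Int) ≤ z)) a < (fun z => decide ((0:Int) ≤ z)) b))
      x (negs ++ poss)
      = negs ++ x :: poss := by
  induction negs with
  | nil =>
    cases poss with
    | nil => simp [PySem.List.insertBy]
    | cons y ys =>
      have hy : 0 ≤ y := hp y (by simp)
      simp only [List.nil_append, pvInsertBy_cons]
      rw [if_pos (by simp [Bool.lt_iff, hy]; omega)]
  | cons m ms ih =>
    have hm : m < 0 := hn m (by simp)
    simp only [List.cons_append, pvInsertBy_cons]
    rw [if_neg (by simp [Bool.lt_iff]; omega)]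
    rw [ih (fun y hy => hn y (by simp [hy]))]

-- inserting a non-negative element always goes to the end
theorem pvIns_pos (x : Int) (hx : 0 ≤ x) (l : List Int) :
    PySem.List.insertBy
      (fun a b => decide ((fun z => decide ((0:Int) ≤ z)) a < (fun z => decide ((0:Int) ≤ z)) b))
      x l = l ++ [x] := by
  apply PySem.List.insertBy_of_forall_not_before
  intro y _
  simp [hx, Bool.lt_iff]

-- the stable-sort fold keeps 'negatives then non-negatives', generalized over the accumulator
theorem pvB_fold (l negs poss : List Int) (hn : ∀ y ∈ negs, y < 0) (hp : ∀ y ∈ poss, 0 ≤ y) :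
    l.foldl (fun acc x =>
        PySem.List.insertBy
          (fun a b => decide ((fun z => decide ((0:Int) ≤ z)) a < (fun z => decide ((0:Int) ≤ z)) b))
          x acc) (negs ++ poss)
      = (negs ++ l.filter (fun x => decide (x < 0))) ++ (poss ++ l.filter (fun x => decide (0 ≤ x))) := by
  induction l generalizing negs poss with
  | nil => simp
  | cons x t ih =>
    by_cases hx : x < 0
    · simp only [List.foldl_cons]
      rw [pvIns_neg x hx negs poss hn hp]
      have : negs ++ x :: poss = (negs ++ [x]) ++ poss := by simp
      rw [this, ih (negs ++ [x]) poss
        (by intro y hy; rcases List.mem_append.mp hy with h | h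
            · exact hn y h
            · simp at h; omega) hp]
      simp [hx, show ¬ (0 ≤ x) by omega]
    · simp only [List.foldl_cons]
      rw [show negs ++ poss = (negs ++ poss) ++ [] by simp, pvIns_pos x (by omega)]
      have : (negs ++ poss) ++ [] ++ [x] = negs ++ (poss ++ [x]) := by simp
      rw [this, ih negs (poss ++ [x]) hn
        (by intro y hy; rcases List.mem_append.mp hy with h | h
            · exact hp y h
            · simp at h; omega)]
      simp [hx, show 0 ≤ x by omega]

-- sorted(l, key=lambda x: x >= 0) is the stable partition: negatives first
theorem pvSorted_eq_partition (l : List Int) :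
    PySem.List.sorted l (fun x => decide (0 ≤ x)) false
      = l.filter (fun x => decide (x < 0)) ++ l.filter (fun x => decide (0 ≤ x)) := by
  rw [PySem.List.sorted_eq_foldl_insertBy]
  have := pvB_fold l [] [] (by simp) (by simp)
  simpa using this

-- ===== VERDICT (by name: the statement is the Claim_ definition above) =====
theorem re_arrange_array_spec : Claim_equal_re_arrange_array := by
  intro arr n _ _
  unfold Spec_re_arrange_array re_arrange_array re_arrange_array_alt
  simp only []
  rw [pvSorted_eq_partition]
  rw [show ((PySem.List.pyRange 0 n 1).foldl
      (fun (acc : List Int × List Int) i =>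
        if PySem.List.pyGetD arr i 0 < 0 then (acc.1 ++ [PySem.List.pyGetD arr i 0], acc.2)
        else (acc.1, acc.2 ++ [PySem.List.pyGetD arr i 0]))
      ([], [])) =
    ((PySem.List.pyRange 0 n 1).map (fun i => PySem.List.pyGetD arr i 0)).foldl
      (fun (acc : List Int × List Int) x =>
        if x < 0 then (acc.1 ++ [x], acc.2) else (acc.1, acc.2 ++ [x])) ([], []) by
    rw [List.foldl_map]]
  rw [pvA_fold]
  simp
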